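-- pv_equiv track=rewrite | github.com/robertu94/m | m/__main__.py | make_abbreviations
-- ===== SOURCE A (Python) =====
-- import collections
-- import itertools
--
-- MODES = (
--     "build",
--     "clean",
--     "configure",
--     "test",
--     "install",
--     "settings",
--     "run",
--     "bench",
--     "tidy",
--     "format",
--     "generate",
--     "repl",
-- )
--
-- def make_abbreviations(mode):
--     """creates a list of abbreviations for a given mode
--     the list of abbreviations is all prefixes for a given mode.
--     If prefixes are non-unique, then they are assigned to the first mode that has that prefix
--
--     i.e. build -> b, bu, bui, buil
--     i.e. bench -> be, ben, benc
--         note b is assigned to build since it comes first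
--     """
--     abbreviations = {}
--     for _mode in reversed(MODES):
--         for prefix in itertools.accumulate(_mode):
--             abbreviations[prefix] = _mode
--
--     inv_abbrev = collections.defaultdict(list)
--     for key in abbreviations:
--         inv_abbrev[abbreviations[key]].append(key)
--
--     return inv_abbrev[mode]
-- ===== SOURCE B (Python) =====
-- import itertools
--
-- MODES = (
--     "build",
--     "clean",
--     "configure",
--     "test",
--     "install",
--     "settings",
--     "run",
--     "bench",
--     "tidy",
--     "format",
--     "generate",
--     "repl",
-- )
--
-- def make_abbreviations(mode):
--     """creates a list of abbreviations for a given mode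
--     the list of abbreviations is all prefixes for a given mode.
--     If prefixes are non-unique, then they are assigned to the first mode that has that prefix
--     """
--     earlier = set()
--     for m in MODES:
--         if m == mode:
--             return [p for p in itertools.accumulate(mode) if p not in earlier]
--         earlier.update(itertools.accumulate(m))
--     return []
-- ===== Notes on version B (the rewrite author's own statement) =====
-- stated objective: simpler
-- what changed: Instead of building a prefix->mode dict over all of reversed MODES and then inverting it into a defaultdict, B scans MODES once, accumulating a set of prefixes of strictly-earlier modes, and on finding the requested mode returns its accumulated prefixes filtered by that set.
import Mathlib
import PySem

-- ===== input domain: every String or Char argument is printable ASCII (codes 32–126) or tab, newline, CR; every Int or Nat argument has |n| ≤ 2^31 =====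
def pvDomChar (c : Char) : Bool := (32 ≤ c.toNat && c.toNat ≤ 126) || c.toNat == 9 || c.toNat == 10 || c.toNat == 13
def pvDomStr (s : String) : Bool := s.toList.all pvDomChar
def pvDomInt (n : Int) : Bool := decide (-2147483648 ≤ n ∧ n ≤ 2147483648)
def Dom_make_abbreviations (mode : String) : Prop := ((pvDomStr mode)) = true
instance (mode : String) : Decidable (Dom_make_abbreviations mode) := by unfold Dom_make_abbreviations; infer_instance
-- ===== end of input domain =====

-- B replaces A's build-full-dict-then-invert with one early-exiting scan that filters the
-- mode's prefixes against the prefixes of strictly-earlier modes (objective: simpler).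
-- Equivalence is about the RETURN value only: A's defaultdict lookup also inserts `mode`
-- into a local dict, which no caller can observe.

-- ===== PORT A =====
def pvMODES : List String :=
  ["build", "clean", "configure", "test", "install", "settings",
   "run", "bench", "tidy", "format", "generate", "repl"]

-- itertools.accumulate(word): the nonempty prefixes of the word, shortest first
def pyAccumulate (s : String) : List String :=
  (s.toList.foldl (fun (st : List Char × List String) c =>
      (st.1 ++ [c], st.2 ++ [String.ofList (st.1 ++ [c])])) ([], [])).2

-- abbreviations = {}; for _mode in reversed(pvMODES): for prefix in accumulate(_mode): abbreviations[prefix] = _mode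
def abbrevDict : PySem.Dict String String :=
  pvMODES.reverse.foldl
    (fun d m => (pyAccumulate m).foldl (fun d p => d.insert p m) d)
    PySem.Dict.empty

-- inv_abbrev = defaultdict(list); for key in abbreviations: inv_abbrev[abbreviations[key]].append(key)
def invAbbrev : PySem.Dict String (List String) :=
  abbrevDict.items.foldl (fun d kv => d.modify kv.2 [] (fun l => l ++ [kv.1])) PySem.Dict.empty

def make_abbreviations (mode : String) : List String :=
  invAbbrev.getD mode []

-- ===== PORT B =====
-- for m in pvMODES: if m == mode: return [p for p in accumulate(mode) if p not in earlier]; earlier.update(accumulate(m))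
def altScan (mode : String) : List String → PySem.Set String → List String
  | [], _ => []
  | m :: rest, earlier =>
      if m = mode then
        (pyAccumulate mode).filter (fun p => !(PySem.Set.contains earlier p))
      else
        altScan mode rest (PySem.Set.update earlier (pyAccumulate m))

def make_abbreviations_alt (mode : String) : List String :=
  altScan mode pvMODES PySem.Set.empty

-- ===== PRECONDITION & SPEC =====
def Spec_make_abbreviations (mode : String) (out : List String) : Prop := out = make_abbreviations_alt mode
instance (mode : String) (out : List String) : Decidable (Spec_make_abbreviations mode out) := by unfold Spec_make_abbreviations; infer_instance

-- ===== CLAIM (what is proved, stated in full; the proofs are below) =====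
def Claim_equal_make_abbreviations : Prop := ∀ (mode : String), Dom_make_abbreviations mode → Spec_make_abbreviations mode (make_abbreviations mode)

-- ===== LEMMAS AND PROOFS =====

set_option maxRecDepth 40000 in
theorem keys_invAbbrev_subset : invAbbrev.keys ⊆ pvMODES := by decide

theorem eq_of_not_mem_pvMODES (mode : String) (h : mode ∉ pvMODES) :
    make_abbreviations mode = make_abbreviations_alt mode := by
  have hA : make_abbreviations mode = [] := by
    unfold make_abbreviations
    rw [PySem.Dict.getD_eq_get?_getD,
        (PySem.Dict.get?_eq_none_iff_not_mem_keys invAbbrev mode).mpr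
          (fun hm => h (keys_invAbbrev_subset hm))]
    rfl
  have hB : make_abbreviations_alt mode = [] := by
    simp only [pvMODES, List.mem_cons, List.not_mem_nil, or_false, not_or] at h
    obtain ⟨h1, h2, h3, h4, h5, h6, h7, h8, h9, h10, h11, h12⟩ := h
    unfold make_abbreviations_alt pvMODES
    rw [altScan, if_neg (fun e => h1 e.symm)]
    rw [altScan, if_neg (fun e => h2 e.symm)]
    rw [altScan, if_neg (fun e => h3 e.symm)]
    rw [altScan, if_neg (fun e => h4 e.symm)]
    rw [altScan, if_neg (fun e => h5 e.symm)]
    rw [altScan, if_neg (fun e => h6 e.symm)]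
    rw [altScan, if_neg (fun e => h7 e.symm)]
    rw [altScan, if_neg (fun e => h8 e.symm)]
    rw [altScan, if_neg (fun e => h9 e.symm)]
    rw [altScan, if_neg (fun e => h10 e.symm)]
    rw [altScan, if_neg (fun e => h11 e.symm)]
    rw [altScan, if_neg (fun e => h12 e.symm)]
    rw [altScan]
  rw [hA, hB]

-- ===== VERDICT (by name: the statement is the Claim_ definition above) =====
set_option maxRecDepth 40000 in
theorem make_abbreviations_spec : Claim_equal_make_abbreviations := by
  intro mode _
  unfold Spec_make_abbreviations
  by_cases h : mode ∈ pvMODES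
  · fin_cases h <;> decide
  · exact eq_of_not_mem_pvMODES mode h
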